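-- pv_equiv track=rewrite | github.com/ShufanSun/VideoDenoise | sharpen.py | laplace
-- ===== SOURCE A (Python) =====
-- def laplace(region):
--     """Apply Laplace operator to a given 3x3 pixel region (for each RGB channel)."""
--     # Split the region into separate R, G, B components for each pixel
--     r_values = [coord[0] for coord in region]  # Extract R values
--     g_values = [coord[1] for coord in region]  # Extract G values
--     b_values = [coord[2] for coord in region]  # Extract B values
--
--     # Apply Laplace operator to each channel
--     r_result = sum(r_values[1:5]) - 4 * r_values[0]
--     g_result = sum(g_values[1:5]) - 4 * g_values[0]
--     b_result = sum(b_values[1:5]) - 4 * b_values[0]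
--
--     # Return a tuple of the results for each channel
--     return (r_result, g_result, b_result)
-- ===== SOURCE B (Python) =====
-- def laplace(region):
--     """Apply Laplace operator to a given 3x3 pixel region (for each RGB channel)."""
--     r = g = b = 0
--     for i, coord in enumerate(region[:5]):
--         w = -4 if i == 0 else 1
--         r += w * coord[0]
--         g += w * coord[1]
--         b += w * coord[2]
--     return (r, g, b)
-- ===== Notes on version B (the rewrite author's own statement) =====
-- stated objective: simpler
-- what changed: Replaces the channel-major split into three lists plus slice-sums by a single pixel-major pass over region[:5] accumulating all three channels with a weight of -4 for the centre pixel and 1 otherwise.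
import Mathlib
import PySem

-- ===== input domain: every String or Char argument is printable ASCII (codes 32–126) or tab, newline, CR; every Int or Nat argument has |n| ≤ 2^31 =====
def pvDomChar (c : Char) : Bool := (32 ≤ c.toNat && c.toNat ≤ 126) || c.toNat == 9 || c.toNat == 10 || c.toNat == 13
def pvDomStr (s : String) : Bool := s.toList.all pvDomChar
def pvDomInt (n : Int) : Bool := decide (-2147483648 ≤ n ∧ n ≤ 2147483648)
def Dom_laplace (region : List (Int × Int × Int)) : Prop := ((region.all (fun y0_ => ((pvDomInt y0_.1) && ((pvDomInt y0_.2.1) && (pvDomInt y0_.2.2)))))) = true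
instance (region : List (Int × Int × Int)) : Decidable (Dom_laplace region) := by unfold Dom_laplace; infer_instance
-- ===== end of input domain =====

-- B replaces the channel-major split-then-sum by one pixel-major weighted pass over region[:5] (objective: simpler).

-- ===== PORT A =====
def laplace (region : List (Int × Int × Int)) : Int × Int × Int :=
  let r_values := region.map (fun c => c.1)
  let g_values := region.map (fun c => c.2.1)
  let b_values := region.map (fun c => c.2.2)
  -- r_values[0] raises IndexError on the empty region; Pre_laplace excludes it
  let r_result := (PySem.List.slice r_values (some 1) (some 5)).sum - 4 * PySem.List.pyGetD r_values 0 0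
  let g_result := (PySem.List.slice g_values (some 1) (some 5)).sum - 4 * PySem.List.pyGetD g_values 0 0
  let b_result := (PySem.List.slice b_values (some 1) (some 5)).sum - 4 * PySem.List.pyGetD b_values 0 0
  (r_result, g_result, b_result)

-- ===== PORT B =====
-- the loop body of B's 'for i, coord in enumerate(region[:5])'
def lapStep (acc : Int × Int × Int) (p : Int × (Int × Int × Int)) : Int × Int × Int :=
  let w : Int := if p.1 == 0 then -4 else 1
  (acc.1 + w * p.2.1, acc.2.1 + w * p.2.2.1, acc.2.2 + w * p.2.2.2)

def laplace_alt (region : List (Int × Int × Int)) : Int × Int × Int :=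
  (PySem.List.enumerate (PySem.List.slice region none (some 5))).foldl lapStep (0, 0, 0)

-- ===== PRECONDITION & SPEC =====
-- Pre_ excludes exactly the empty region, on which A raises IndexError (r_values[0]).
def Pre_laplace (region : List (Int × Int × Int)) : Prop := region ≠ []
instance (region : List (Int × Int × Int)) : Decidable (Pre_laplace region) := by unfold Pre_laplace; infer_instance
def pvWitness_laplace : (List (Int × Int × Int)) := [(1, 2, 3), (4, 5, 6)]

def Spec_laplace (region : List (Int × Int × Int)) (out : Int × Int × Int) : Prop := out = laplace_alt region
instance (region : List (Int × Int × Int)) (out : Int × Int × Int) : Decidable (Spec_laplace region out) := by unfold Spec_laplace; infer_instance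

-- ===== CLAIM (what is proved, stated in full; the proofs are below) =====
def Claim_equal_laplace : Prop := ∀ (region : List (Int × Int × Int)), Dom_laplace region → Pre_laplace region → Spec_laplace region (laplace region)

-- ===== LEMMAS AND PROOFS =====

-- After the head pixel, every index in B's fold is ≥ 1, so the weight is constantly 1:
-- the fold just adds the three channel sums to the accumulator.
theorem foldl_lapStep_pos (l : List (Int × Int × Int)) (s : Int) (hs : 1 ≤ s)
    (acc : Int × Int × Int) :
    (PySem.List.enumerate l s).foldl lapStep acc
      = (acc.1 + (l.map (fun c => c.1)).sum,
         acc.2.1 + (l.map (fun c => c.2.1)).sum,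
         acc.2.2 + (l.map (fun c => c.2.2)).sum) := by
  induction l generalizing s acc with
  | nil => simp [PySem.List.enumerate_nil]
  | cons x xs ih =>
    have hsne : (s == 0) = false := beq_eq_false_iff_ne.mpr (by omega)
    simp only [PySem.List.enumerate_cons, List.foldl_cons]
    rw [ih (s + 1) (by omega)]
    simp only [lapStep, hsne, Bool.false_eq_true, if_false, Prod.mk.injEq,
      List.map_cons, List.sum_cons]
    refine ⟨by ring, by ring, by ring⟩

-- ===== VERDICT (by name: the statement is the Claim_ definition above) =====
theorem laplace_spec : Claim_equal_laplace := by
  intro region _ hpre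
  unfold Spec_laplace laplace laplace_alt
  cases region with
  | nil => exact absurd rfl hpre
  | cons x xs =>
    have h5 : PySem.List.slice (x :: xs) none (some 5) = x :: xs.take 4 := by
      rw [PySem.List.slice_to _ (by norm_num)]
      simp [List.take_succ_cons]
    have hsl : ∀ (y : Int) (l : List Int),
        PySem.List.slice (y :: l) (some 1) (some 5) = l.take 4 := by
      intro y l
      rw [PySem.List.slice_toNat _ (by norm_num) (by norm_num)]
      simp
    rw [h5, PySem.List.enumerate_cons, List.foldl_cons,
        foldl_lapStep_pos _ (0 + 1) (by norm_num)]
    simp [hsl, lapStep, PySem.List.pyGetD_zero_cons, List.map_take]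
    refine ⟨by ring, by ring, by ring⟩
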